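-- pv_equiv track=rewrite | github.com/Demon000/android_tools | sepolicy_macros.py | merge_matched_types
-- ===== SOURCE A (Python) =====
-- def merge_matched_types(old_matched_types, new_matched_types):
-- 	merged_matched_types = old_matched_types[:]
--
-- 	for i in range(len(new_matched_types)):
-- 		if old_matched_types[i] is None and \
-- 				new_matched_types[i] is not None:
-- 			merged_matched_types[i] = new_matched_types[i]
-- 		elif old_matched_types[i] is not None and \
-- 				new_matched_types[i] is not None:
-- 			return None
--
-- 	return merged_matched_types
-- ===== SOURCE B (Python) =====
-- def merge_matched_types(old_matched_types, new_matched_types):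
-- 	if any(old_matched_types[i] is not None and new_matched_types[i] is not None
-- 			for i in range(len(new_matched_types))):
-- 		return None
-- 	merged = old_matched_types[:]
-- 	for i in range(len(new_matched_types)):
-- 		if merged[i] is None:
-- 			merged[i] = new_matched_types[i]
-- 	return merged
-- ===== Notes on version B (the rewrite author's own statement) =====
-- stated objective: simpler
-- what changed: Replaced the single merge+abort loop by a two-phase decomposition: one any() validation pass detecting a conflict, then a separate fill pass writing new values into None slots; both passes keep range-based indexing so IndexError and tail behaviour are unchanged.
import Mathlib
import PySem

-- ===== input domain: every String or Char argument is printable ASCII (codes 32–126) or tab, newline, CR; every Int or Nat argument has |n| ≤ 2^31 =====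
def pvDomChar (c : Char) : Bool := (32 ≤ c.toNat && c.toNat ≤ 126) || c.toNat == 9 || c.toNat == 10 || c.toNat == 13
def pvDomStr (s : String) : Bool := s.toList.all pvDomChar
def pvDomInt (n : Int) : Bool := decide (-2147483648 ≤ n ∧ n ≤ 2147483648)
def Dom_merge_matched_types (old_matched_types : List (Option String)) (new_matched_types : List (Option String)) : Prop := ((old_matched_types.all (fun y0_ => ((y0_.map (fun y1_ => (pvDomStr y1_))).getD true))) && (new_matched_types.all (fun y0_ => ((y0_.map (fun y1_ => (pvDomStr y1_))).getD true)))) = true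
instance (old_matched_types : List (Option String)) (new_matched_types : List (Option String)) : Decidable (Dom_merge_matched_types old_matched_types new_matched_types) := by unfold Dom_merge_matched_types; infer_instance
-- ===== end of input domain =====

-- B replaces A's single merge-with-early-return loop by a two-phase decomposition
-- (an any() validation pass, then a separate fill pass); same cost, simpler structure.
-- A raises IndexError when new_matched_types is longer than old_matched_types (and so
-- does B); Pre_ excludes exactly those inputs.

-- ===== PORT A =====
-- A's single loop: merged is mutated in place; early return None on conflict.
-- Indexing old_matched_types[i]/new_matched_types[i] is in range inside Pre_, so getD is exact there.
def mergeA_go (old_matched_types new_matched_types : List (Option String)) : List (Option String) → Nat → Option (List (Option String))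
  | merged, i =>
    if _h : i < new_matched_types.length then
      if (old_matched_types.getD i none).isNone && (new_matched_types.getD i none).isSome then
        mergeA_go old_matched_types new_matched_types (merged.set i (new_matched_types.getD i none)) (i + 1)
      else if (old_matched_types.getD i none).isSome && (new_matched_types.getD i none).isSome then
        none
      else
        mergeA_go old_matched_types new_matched_types merged (i + 1)
    else
      some merged
  termination_by _merged i => new_matched_types.length - i

def merge_matched_types (old_matched_types : List (Option String)) (new_matched_types : List (Option String)) : Option (List (Option String)) :=
  mergeA_go old_matched_types new_matched_types old_matched_types 0

-- ===== PORT B =====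
-- B's validation pass: any(old[i] is not None and new[i] is not None for i in range(len(new)))
def conflictB (old_matched_types new_matched_types : List (Option String)) : Bool :=
  (List.range new_matched_types.length).any
    (fun i => (old_matched_types.getD i none).isSome && (new_matched_types.getD i none).isSome)

-- B's fill pass: for i in range(len(new)): if merged[i] is None: merged[i] = new[i]
def fillB (new_matched_types : List (Option String)) (merged : List (Option String)) : List (Option String) :=
  (List.range new_matched_types.length).foldl
    (fun m i => if (m.getD i none).isNone then m.set i (new_matched_types.getD i none) else m)
    merged

def merge_matched_types_alt (old_matched_types : List (Option String)) (new_matched_types : List (Option String)) : Option (List (Option String)) :=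
  if conflictB old_matched_types new_matched_types then none
  else some (fillB new_matched_types old_matched_types)

-- ===== PRECONDITION & SPEC =====
-- Pre_ excludes exactly the inputs where A raises IndexError: new longer than old AND
-- no conflicting index (both sides non-None) occurs before the out-of-range access.
def Pre_merge_matched_types (old_matched_types : List (Option String)) (new_matched_types : List (Option String)) : Prop :=
  new_matched_types.length ≤ old_matched_types.length ∨
    ∃ i < old_matched_types.length,
      (old_matched_types.getD i none).isSome = true ∧ (new_matched_types.getD i none).isSome = true
instance (old_matched_types : List (Option String)) (new_matched_types : List (Option String)) : Decidable (Pre_merge_matched_types old_matched_types new_matched_types) := by unfold Pre_merge_matched_types; infer_instance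

def pvWitness_merge_matched_types : List (Option String) × List (Option String) :=
  ([none, some "a", none], [some "x", none])

def Spec_merge_matched_types (old_matched_types : List (Option String)) (new_matched_types : List (Option String)) (out : Option (List (Option String))) : Prop := out = merge_matched_types_alt old_matched_types new_matched_types
instance (old_matched_types : List (Option String)) (new_matched_types : List (Option String)) (out : Option (List (Option String))) : Decidable (Spec_merge_matched_types old_matched_types new_matched_types out) := by unfold Spec_merge_matched_types; infer_instance

-- ===== CLAIM (what is proved, stated in full; the proofs are below) =====
def Claim_equal_merge_matched_types : Prop := ∀ (old_matched_types : List (Option String)) (new_matched_types : List (Option String)), Dom_merge_matched_types old_matched_types new_matched_types → Pre_merge_matched_types old_matched_types new_matched_types → Spec_merge_matched_types old_matched_types new_matched_types (merge_matched_types old_matched_types new_matched_types)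

-- ===== LEMMAS AND PROOFS =====

-- the per-index predicates/steps, named for readability in the proofs
def predP (old_matched_types new_matched_types : List (Option String)) (i : Nat) : Bool :=
  (old_matched_types.getD i none).isSome && (new_matched_types.getD i none).isSome

def stepP (new_matched_types : List (Option String)) (m : List (Option String)) (i : Nat) : List (Option String) :=
  if (m.getD i none).isNone then m.set i (new_matched_types.getD i none) else m

lemma set_self_of_getD {α : Type} (l : List α) (i : Nat) (d : α) (h : i < l.length) :
    l.set i (l.getD i d) = l := by
  apply List.ext_getElem
  · simp
  · intro j hj hj'
    by_cases hij : i = j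
    · subst hij
      simp [List.getElem?_eq_getElem h, List.getD_eq_getElem l d h]
    · simp [List.getElem_set, hij]

lemma set_none_of_getD_none (l : List (Option String)) (i : Nat) (h : i < l.length)
    (h0 : l.getD i none = none) : l.set i none = l := by
  conv_lhs => rw [← h0]
  exact set_self_of_getD l i none h

lemma getD_set_ne_opt (l : List (Option String)) (i j : Nat) (v : Option String) (hij : i ≠ j) :
    (l.set i v).getD j none = l.getD j none := by
  rw [List.getD_eq_getElem?_getD, List.getElem?_set_ne hij, ← List.getD_eq_getElem?_getD]

-- main loop characterisation: A's loop from index i equals B's two passes over range' i k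
lemma mergeA_go_eq (old_matched_types new_matched_types : List (Option String))
    (hlen : new_matched_types.length ≤ old_matched_types.length) :
    ∀ (k i : Nat) (merged : List (Option String)),
      k = new_matched_types.length - i →
      merged.length = old_matched_types.length →
      (∀ j, i ≤ j → merged.getD j none = old_matched_types.getD j none) →
      mergeA_go old_matched_types new_matched_types merged i =
        if (List.range' i k).any (predP old_matched_types new_matched_types) then none
        else some ((List.range' i k).foldl (stepP new_matched_types) merged) := by
  intro k
  induction k with
  | zero =>
    intro i merged hk _ _
    have hi : ¬ i < new_matched_types.length := by omega
    rw [mergeA_go]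
    simp [hi]
  | succ k ih =>
    intro i merged hk hm hagree
    have hi : i < new_matched_types.length := by omega
    have hio : i < old_matched_types.length := lt_of_lt_of_le hi hlen
    have him : i < merged.length := by omega
    have hmi : merged.getD i none = old_matched_types.getD i none := hagree i le_rfl
    rw [mergeA_go, List.range'_succ]
    simp only [hi, dif_pos, List.any_cons, List.foldl_cons]
    rcases ho : old_matched_types.getD i none with _ | a <;>
      rcases hn : new_matched_types.getD i none with _ | b <;>
      simp only [ho, hn] at hmi ⊢
    · -- old[i] = None, new[i] = None: A skips; B's pred false, step is identity
      simp only [Option.isNone_none, Option.isSome_none, Bool.and_false, Bool.false_eq_true,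
        if_false]
      rw [ih (i + 1) merged (by omega) hm (fun j hj => hagree j (by omega))]
      have hstep : stepP new_matched_types merged i = merged := by
        unfold stepP
        rw [hmi, hn]
        simp only [Option.isNone_none, if_pos]
        exact set_none_of_getD_none merged i him hmi
      have hpred : predP old_matched_types new_matched_types i = false := by
        unfold predP; rw [ho, hn]; rfl
      rw [hstep, hpred]
      rfl
    · -- old[i] = None, new[i] = some b: A fills; B's pred false, step sets the slot
      simp only [Option.isNone_none, Option.isSome_some, Bool.and_true, if_pos]
      have hm' : (merged.set i (some b)).length = old_matched_types.length := by simp [hm]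
      have hagree' : ∀ j, i + 1 ≤ j →
          (merged.set i (some b)).getD j none = old_matched_types.getD j none := fun j hj => by
        rw [getD_set_ne_opt merged i j (some b) (by omega)]
        exact hagree j (by omega)
      rw [ih (i + 1) (merged.set i (some b)) (by omega) hm' hagree']
      have hstep : stepP new_matched_types merged i = merged.set i (some b) := by
        unfold stepP
        rw [hmi, hn]
        simp
      have hpred : predP old_matched_types new_matched_types i = false := by
        unfold predP; rw [ho]; rfl
      rw [hstep, hpred]
      rfl
    · -- old[i] = some a, new[i] = None: A skips; B's pred false, step is identity
      simp only [Option.isNone_some, Option.isSome_none, Bool.false_and, Bool.and_false,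
        Bool.false_eq_true, if_false]
      rw [ih (i + 1) merged (by omega) hm (fun j hj => hagree j (by omega))]
      have hstep : stepP new_matched_types merged i = merged := by
        unfold stepP
        rw [hmi]
        simp
      have hpred : predP old_matched_types new_matched_types i = false := by
        unfold predP; rw [hn]; simp
      rw [hstep, hpred]
      rfl
    · -- conflict: A returns None; B's pred true
      have hpred : predP old_matched_types new_matched_types i = true := by
        unfold predP; rw [ho, hn]; rfl
      rw [hpred]
      simp

-- if a conflict exists at index i (< len new), A's loop returns none from any start j ≤ i
lemma mergeA_go_conflict (old_matched_types new_matched_types : List (Option String)) (i : Nat)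
    (hi : i < new_matched_types.length)
    (h1 : (old_matched_types.getD i none).isSome = true)
    (h2 : (new_matched_types.getD i none).isSome = true) :
    ∀ (d j : Nat) (merged : List (Option String)), j ≤ i → d = i - j →
      mergeA_go old_matched_types new_matched_types merged j = none := by
  intro d
  induction d with
  | zero =>
    intro j merged hj hd
    have hji : j = i := by omega
    subst hji
    have hnone : (old_matched_types.getD j none).isNone = false := by
      cases h : old_matched_types.getD j none
      · rw [h] at h1; simp at h1
      · simp
    rw [mergeA_go]
    simp only [hi, dif_pos]
    rw [hnone, h1, h2]
    rfl
  | succ d ihd =>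
    intro j merged hj hd
    have hjn : j < new_matched_types.length := by omega
    rw [mergeA_go]
    simp only [hjn, dif_pos]
    split_ifs with hA hB
    · exact ihd (j + 1) _ (by omega) (by omega)
    · rfl
    · exact ihd (j + 1) _ (by omega) (by omega)

lemma getD_isSome_lt (l : List (Option String)) (i : Nat)
    (h : (l.getD i none).isSome = true) : i < l.length := by
  by_contra hge
  rw [List.getD_eq_default l none (by omega)] at h
  simp at h

-- ===== VERDICT (by name: the statement is the Claim_ definition above) =====
theorem merge_matched_types_spec : Claim_equal_merge_matched_types := by
  intro old_matched_types new_matched_types _ hpre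
  unfold Spec_merge_matched_types
  rcases hpre with hlen | ⟨i, _, h1, h2⟩
  · unfold merge_matched_types merge_matched_types_alt conflictB fillB
    rw [mergeA_go_eq old_matched_types new_matched_types hlen
        new_matched_types.length 0 old_matched_types (by omega) rfl (fun _ _ => rfl)]
    rw [List.range_eq_range']
    unfold predP stepP
    split_ifs with h
    · rfl
    · rfl
  · have hin : i < new_matched_types.length := getD_isSome_lt new_matched_types i h2
    have hA : merge_matched_types old_matched_types new_matched_types = none := by
      unfold merge_matched_types
      exact mergeA_go_conflict old_matched_types new_matched_types i hin h1 h2 i 0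
        old_matched_types (by omega) (by omega)
    have hcon : conflictB old_matched_types new_matched_types = true := by
      unfold conflictB
      rw [List.any_eq_true]
      exact ⟨i, List.mem_range.mpr hin, by rw [h1, h2]; rfl⟩
    unfold merge_matched_types_alt
    rw [hA, if_pos hcon]
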